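-- pv_equiv track=rewrite | github.com/RealEasyAlgo/NarrowsFiler | AssetsPerExchange.py | group_usdt_perps
-- ===== SOURCE A (Python) =====
-- def group_usdt_perps(exchanges, entries):
--     """
--     From the full list of entries, build a mapping:
--       exchange -> sorted list of tickers ending with 'USDT.P'
--     """
--     result = { exch: [] for exch in exchanges }
--
--     for item in entries:
--         s = item.get("s", "")
--         if ":" not in s:
--             continue
--         exch, ticker = s.split(":", 1)
--         # only keep our target exchanges
--         if exch not in exchanges:
--             continue
--         # only USDT perpetuals
--         if not ticker.endswith("USDT.P"):
--             continue
--         result[exch].append(ticker)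
--
--     # dedupe & sort each list
--     for exch in result:
--         result[exch] = sorted(set(result[exch]))
--
--     return result
-- ===== SOURCE B (Python) =====
-- def group_usdt_perps(exchanges, entries):
--     """
--     From the full list of entries, build a mapping:
--       exchange -> sorted list of tickers ending with 'USDT.P'
--     """
--     matches = [
--         s.split(":", 1)
--         for s in (item.get("s", "") for item in entries)
--         if ":" in s
--     ]
--     def bucket(exch):
--         return sorted({t for e, t in matches if e == exch and t.endswith("USDT.P")})
--     return {exch: bucket(exch) for exch in exchanges}
-- ===== Notes on version B (the rewrite author's own statement) =====
-- stated objective: idiomatic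
-- what changed: Replaces A's three phases (pre-seeded dict, a scatter pass appending into mutable buckets, then an in-place dedupe-and-sort pass over the dict) by one comprehension pass that splits each entry once into (exchange, ticker) pairs and a dict comprehension that builds each exchange's sorted set of matching tickers with its own filtered scan of those pairs.
import Mathlib
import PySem

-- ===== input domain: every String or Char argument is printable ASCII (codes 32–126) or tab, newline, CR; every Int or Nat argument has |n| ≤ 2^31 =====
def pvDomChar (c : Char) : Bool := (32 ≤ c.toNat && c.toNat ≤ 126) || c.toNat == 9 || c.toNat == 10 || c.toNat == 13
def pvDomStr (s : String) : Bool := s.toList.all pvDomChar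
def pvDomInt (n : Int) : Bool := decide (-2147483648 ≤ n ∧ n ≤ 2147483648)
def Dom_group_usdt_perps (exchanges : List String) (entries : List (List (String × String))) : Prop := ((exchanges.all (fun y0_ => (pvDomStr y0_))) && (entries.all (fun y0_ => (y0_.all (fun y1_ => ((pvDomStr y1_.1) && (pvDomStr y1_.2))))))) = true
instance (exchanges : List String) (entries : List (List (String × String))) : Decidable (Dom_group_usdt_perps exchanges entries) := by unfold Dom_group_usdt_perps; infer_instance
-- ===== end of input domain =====

-- B replaces A's scatter pass + dedupe/sort pass by one dict comprehension building each
-- exchange's sorted set with its own filtered scan of the entries (idiomatic; not faster).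

-- ===== PORT A =====
-- s = item.get("s", ""); the guarded append body of A's entry loop
def pvStepA (exchanges : List String) (d : PySem.Dict String (List String)) (item : List (String × String)) : PySem.Dict String (List String) :=
  let s := (PySem.Dict.mk item).getD "s" ""
  if PySem.Str.isIn ":" s then
    let parts := (PySem.Str.splitMax? s ":" 1).getD []
    let exch := parts.getD 0 ""
    let ticker := parts.getD 1 ""
    if exchanges.contains exch then
      if PySem.Str.endswith ticker "USDT.P" then d.modify exch [] (· ++ [ticker])
      else d
    else d
  else d

def group_usdt_perps (exchanges : List String) (entries : List (List (String × String))) : List (String × List String) :=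
  let result := exchanges.foldl (fun d exch => d.insert exch ([] : List String)) PySem.Dict.empty
  let result := entries.foldl (pvStepA exchanges) result
  -- for exch in result: result[exch] = sorted(set(result[exch]))
  result.items.map (fun p => (p.1, PySem.List.sorted (PySem.Set.ofList p.2) (fun x => x) false))

-- ===== PORT B =====
-- one split pass: s.split(":", 1) for each entry whose s contains ":"
def pvMFun (item : List (String × String)) : Option (String × String) :=
  let s := (PySem.Dict.mk item).getD "s" ""
  if PySem.Str.isIn ":" s then
    some (((PySem.Str.splitMax? s ":" 1).getD []).getD 0 "",
          ((PySem.Str.splitMax? s ":" 1).getD []).getD 1 "")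
  else none

-- the per-pair filter of bucket's set comprehension
def pvTFun (exch : String) (p : String × String) : Option String :=
  if p.1 == exch && PySem.Str.endswith p.2 "USDT.P" then some p.2 else none

-- bucket(exch) = sorted({t for (e, t) in ms if e == exch and t.endswith("USDT.P")})
def pvBucket (ms : List (String × String)) (exch : String) : List String :=
  PySem.List.sorted (PySem.Set.ofList (ms.filterMap (pvTFun exch))) (fun x => x) false

def group_usdt_perps_alt (exchanges : List String) (entries : List (List (String × String))) : List (String × List String) :=
  let ms := entries.filterMap pvMFun
  (exchanges.foldl (fun d exch => d.insert exch (pvBucket ms exch)) PySem.Dict.empty).items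

-- ===== PRECONDITION & SPEC =====
def Spec_group_usdt_perps (exchanges : List String) (entries : List (List (String × String))) (out : List (String × List String)) : Prop := out = group_usdt_perps_alt exchanges entries
instance (exchanges : List String) (entries : List (List (String × String))) (out : List (String × List String)) : Decidable (Spec_group_usdt_perps exchanges entries out) := by unfold Spec_group_usdt_perps; infer_instance

-- ===== CLAIM (what is proved, stated in full; the proofs are below) =====
def Claim_equal_group_usdt_perps : Prop := ∀ (exchanges : List String) (entries : List (List (String × String))), Dom_group_usdt_perps exchanges entries → Spec_group_usdt_perps exchanges entries (group_usdt_perps exchanges entries)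

-- ===== LEMMAS AND PROOFS =====

-- the (exchange, ticker) pair A's entry loop appends, if any
def pvKeyTick (exchanges : List String) (item : List (String × String)) : Option (String × String) :=
  let s := (PySem.Dict.mk item).getD "s" ""
  if PySem.Str.isIn ":" s then
    let parts := (PySem.Str.splitMax? s ":" 1).getD []
    if exchanges.contains (parts.getD 0 "") && PySem.Str.endswith (parts.getD 1 "") "USDT.P"
    then some (parts.getD 0 "", parts.getD 1 "")
    else none
  else none

theorem pvStepA_eq (exchanges : List String) (d : PySem.Dict String (List String)) (item : List (String × String)) :
    pvStepA exchanges d item =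
      match pvKeyTick exchanges item with
      | some p => d.modify p.1 [] (· ++ [p.2])
      | none => d := by
  simp only [pvStepA, pvKeyTick]
  split_ifs with h1 h2 h3 h4 <;> simp_all

theorem pvLoopA_eq (exchanges : List String) (entries : List (List (String × String))) (d : PySem.Dict String (List String)) :
    entries.foldl (pvStepA exchanges) d =
      (entries.filterMap (pvKeyTick exchanges)).foldl (fun d p => d.modify p.1 [] (· ++ [p.2])) d := by
  induction entries generalizing d with
  | nil => rfl
  | cons item rest ih =>
      simp only [List.foldl_cons, List.filterMap_cons, pvStepA_eq]
      cases pvKeyTick exchanges item with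
      | none => exact ih d
      | some p => simp [ih]

-- seed dict: every lookup (with default []) is []
theorem pvSeed_getD (exchanges : List String) (d : PySem.Dict String (List String))
    (hd : ∀ c, d.getD c [] = []) (c : String) :
    (exchanges.foldl (fun d exch => d.insert exch ([] : List String)) d).getD c [] = [] := by
  induction exchanges generalizing d with
  | nil => exact hd c
  | cons x rest ih =>
      simp only [List.foldl_cons]
      exact ih _ (fun c' => by rw [PySem.Dict.getD_insert]; split <;> simp [hd])

-- fold of inserts whose value depends only on the key
theorem pvInsert_getD (xs : List String) (f : String → List String) (d : PySem.Dict String (List String)) (c : String) :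
    (xs.foldl (fun d x => d.insert x (f x)) d).getD c [] = if c ∈ xs then f c else d.getD c [] := by
  induction xs generalizing d with
  | nil => simp
  | cons x rest ih =>
      simp only [List.foldl_cons, ih, List.mem_cons]
      by_cases h1 : c ∈ rest
      · simp [h1]
      · simp only [h1, if_false, or_false]
        rw [PySem.Dict.getD_insert]
        by_cases h2 : c = x <;> simp [h2]

-- keys of a fold of key-determined inserts are the deduped key list
theorem pvKeys_fold (xs : List String) (f : String → List String) :
    (xs.foldl (fun d x => d.insert x (f x)) PySem.Dict.empty).keys = PySem.Set.ofList xs := by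
  rw [PySem.Dict.keys_foldl_insert]
  simp [PySem.Set.update_nil_left]

-- every key A's scatter loop touches is one of the exchanges
theorem pvKeyTick_fst_mem (exchanges : List String) (item : List (String × String)) (q : String × String)
    (hq : pvKeyTick exchanges item = some q) : q.1 ∈ exchanges := by
  simp only [pvKeyTick] at hq
  split_ifs at hq with h1 h2
  · cases hq
    rw [Bool.and_eq_true] at h2
    simpa using h2.1

-- keys of A's dict after the scatter loop: still the deduped exchanges
theorem pvKeys_A (exchanges : List String) (entries : List (List (String × String))) :
    ((entries.filterMap (pvKeyTick exchanges)).foldl (fun d p => d.modify p.1 [] (· ++ [p.2]))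
      (exchanges.foldl (fun d exch => d.insert exch ([] : List String)) PySem.Dict.empty)).keys
      = PySem.Set.ofList exchanges := by
  rw [PySem.Dict.keys_foldl_modify_key (key := Prod.fst)]
  rw [pvKeys_fold exchanges (fun _ => [])]
  rw [PySem.Set.update_eq_append_filter]
  have hsub : ∀ p ∈ (entries.filterMap (pvKeyTick exchanges)).map Prod.fst, p ∈ exchanges := by
    intro p hp
    simp only [List.mem_map, List.mem_filterMap] at hp
    obtain ⟨q, ⟨item, _, hq⟩, rfl⟩ := hp
    exact pvKeyTick_fst_mem exchanges item q hq
  have hfil : (PySem.Set.ofList ((entries.filterMap (pvKeyTick exchanges)).map Prod.fst)).filter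
      (fun y => !(PySem.Set.contains (PySem.Set.ofList exchanges) y)) = [] := by
    rw [List.filter_eq_nil_iff]
    intro a ha
    have ha' : a ∈ exchanges := hsub a (by simpa [PySem.Set.mem_ofList] using ha)
    simp [PySem.Set.contains_eq_listContains, ha']
  rw [hfil, List.append_nil]

-- the raw ticker list A accumulates at key k equals B's filtered scan, for k among the exchanges
theorem pvRaw_eq (exchanges : List String) (entries : List (List (String × String))) (k : String) (hk : k ∈ exchanges) :
    ((entries.filterMap (pvKeyTick exchanges)).filter (fun p => p.1 == k)).map (·.2)
      = (entries.filterMap pvMFun).filterMap (pvTFun k) := by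
  induction entries with
  | nil => rfl
  | cons item rest ih =>
      by_cases h1 : PySem.Str.isIn ":" ((PySem.Dict.mk item).getD "s" "") = true
      · by_cases he : ((PySem.Str.splitMax? ((PySem.Dict.mk item).getD "s" "") ":" 1).getD []).getD 0 "" = k
        · by_cases h3 : PySem.Str.endswith (((PySem.Str.splitMax? ((PySem.Dict.mk item).getD "s" "") ":" 1).getD []).getD 1 "") "USDT.P" = true
          · simp_all [pvKeyTick, pvMFun, pvTFun]
          · simp_all [pvKeyTick, pvMFun, pvTFun]
        · by_cases hc : exchanges.contains (((PySem.Str.splitMax? ((PySem.Dict.mk item).getD "s" "") ":" 1).getD []).getD 0 "") = true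
          · by_cases h3 : PySem.Str.endswith (((PySem.Str.splitMax? ((PySem.Dict.mk item).getD "s" "") ":" 1).getD []).getD 1 "") "USDT.P" = true
            · simp_all [pvKeyTick, pvMFun, pvTFun]
            · simp_all [pvKeyTick, pvMFun, pvTFun]
          · simp_all [pvKeyTick, pvMFun, pvTFun]
      · simp_all [pvKeyTick, pvMFun, pvTFun]

-- lookup in A's post-scatter dict (cited: PySem.Dict.getD_foldl_modify_append, pvSeed_getD)
theorem pvA_getD (exchanges : List String) (entries : List (List (String × String))) (c : String) :
    ((entries.filterMap (pvKeyTick exchanges)).foldl (fun d p => d.modify p.1 [] (· ++ [p.2]))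
      (exchanges.foldl (fun d exch => d.insert exch ([] : List String)) PySem.Dict.empty)).getD c []
      = ((entries.filterMap (pvKeyTick exchanges)).filter (fun p => p.1 == c)).map (·.2) := by
  rw [PySem.Dict.getD_foldl_modify_append]
  rw [pvSeed_getD exchanges PySem.Dict.empty (fun c => by simp) c]
  simp

-- ===== VERDICT (by name: the statement is the Claim_ definition above) =====
theorem group_usdt_perps_spec : Claim_equal_group_usdt_perps := by
  intro exchanges entries _
  show group_usdt_perps exchanges entries = group_usdt_perps_alt exchanges entries
  show (List.map (fun p => (p.1, PySem.List.sorted (PySem.Set.ofList p.2) (fun x => x) false))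
      ((entries.foldl (pvStepA exchanges)
        (exchanges.foldl (fun d exch => d.insert exch ([] : List String)) PySem.Dict.empty)).items))
    = (exchanges.foldl (fun d exch => d.insert exch (pvBucket (entries.filterMap pvMFun) exch)) PySem.Dict.empty).items
  rw [pvLoopA_eq]
  set dA := (entries.filterMap (pvKeyTick exchanges)).foldl (fun d p => d.modify p.1 [] (· ++ [p.2]))
      (exchanges.foldl (fun d exch => d.insert exch ([] : List String)) PySem.Dict.empty) with hdA
  set dB := exchanges.foldl (fun d exch => d.insert exch (pvBucket (entries.filterMap pvMFun) exch)) PySem.Dict.empty with hdB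
  have hkA : dA.keys = PySem.Set.ofList exchanges := pvKeys_A exchanges entries
  have hkB : dB.keys = PySem.Set.ofList exchanges := pvKeys_fold exchanges (pvBucket (entries.filterMap pvMFun))
  have hndA : dA.keys.Nodup := by rw [hkA]; exact PySem.Set.nodup_ofList exchanges
  have hndB : dB.keys.Nodup := by rw [hkB]; exact PySem.Set.nodup_ofList exchanges
  rw [PySem.Dict.items_eq_map_keys dA hndA [], PySem.Dict.items_eq_map_keys dB hndB [], hkA, hkB,
      List.map_map]
  apply List.map_congr_left
  intro k hkmem
  have hkex : k ∈ exchanges := by simpa [PySem.Set.mem_ofList] using hkmem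
  have h1 : dA.getD k [] = ((entries.filterMap (pvKeyTick exchanges)).filter (fun p => p.1 == k)).map (·.2) :=
    pvA_getD exchanges entries k
  have h2 : dB.getD k [] = pvBucket (entries.filterMap pvMFun) k := by
    rw [hdB, pvInsert_getD exchanges (pvBucket (entries.filterMap pvMFun)) PySem.Dict.empty k, if_pos hkex]
  simp only [Function.comp, h1, h2, pvBucket, pvRaw_eq exchanges entries k hkex]
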